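-- pv_equiv track=rewrite | github.com/Office-Studio-Jj/biblioteca-dga | notebooklm_skill/scripts/merceologia_agent.py | _seccion_para_capitulo
-- ===== SOURCE A (Python) =====
-- _SECCIONES_SA = [
--     ("I",     range(1, 6),   "Animales vivos y productos del reino animal"),
--     ("II",    range(6, 15),  "Productos del reino vegetal"),
--     ("III",   range(15, 16), "Grasas y aceites animales o vegetales"),
--     ("IV",    range(16, 25), "Productos alimenticios; bebidas; tabaco"),
--     ("V",     range(25, 28), "Productos minerales"),
--     ("VI",    range(28, 39), "Productos de las industrias quimicas"),
--     ("VII",   range(39, 41), "Plasticos y caucho"),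
--     ("VIII",  range(41, 44), "Pieles, cueros, peleteria"),
--     ("IX",    range(44, 47), "Madera, carbon vegetal, corcho"),
--     ("X",     range(47, 50), "Pasta de madera, papel y carton"),
--     ("XI",    range(50, 64), "Materias textiles y sus manufacturas"),
--     ("XII",   range(64, 68), "Calzado, sombrereria, paraguas"),
--     ("XIII",  range(68, 71), "Manufacturas de piedra, yeso, vidrio, ceramica"),
--     ("XIV",   range(71, 72), "Perlas finas, piedras y metales preciosos"),
--     ("XV",    range(72, 84), "Metales comunes y sus manufacturas"),
--     ("XVI",   range(84, 86), "Maquinas y aparatos, material electrico"),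
--     ("XVII",  range(86, 90), "Material de transporte"),
--     ("XVIII", range(90, 93), "Instrumentos de optica, fotografia, medico"),
--     ("XIX",   range(93, 94), "Armas, municiones y sus partes"),
--     ("XX",    range(94, 97), "Mercancias y productos diversos"),
--     ("XXI",   range(97, 98), "Objetos de arte, antiguedades"),
-- ]
--
-- def _seccion_para_capitulo(cap: str) -> tuple:
--     """Devuelve (numero_romano, nombre_seccion) para un numero de capitulo str."""
--     try:
--         cap_n = int(cap)
--     except (ValueError, TypeError):
--         return ("?", "Verificar Arancel")
--     for romano, rng, nombre in _SECCIONES_SA: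
--         if cap_n in rng:
--             return (romano, nombre)
--     return ("?", "Verificar Arancel")
-- ===== SOURCE B (Python) =====
-- # B: instead of scanning 21 ranges, binary-search the sorted section start
-- # boundaries for the last start <= chapter number.
-- _STARTS  = [1, 6, 15, 16, 25, 28, 39, 41, 44, 47, 50, 64, 68, 71, 72, 84, 86, 90, 93, 94, 97, 98]
-- _ROMANOS = ["I", "II", "III", "IV", "V", "VI", "VII", "VIII", "IX", "X", "XI",
--             "XII", "XIII", "XIV", "XV", "XVI", "XVII", "XVIII", "XIX", "XX", "XXI"]
-- _NOMBRES = [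
--     "Animales vivos y productos del reino animal",
--     "Productos del reino vegetal",
--     "Grasas y aceites animales o vegetales",
--     "Productos alimenticios; bebidas; tabaco",
--     "Productos minerales",
--     "Productos de las industrias quimicas",
--     "Plasticos y caucho",
--     "Pieles, cueros, peleteria",
--     "Madera, carbon vegetal, corcho",
--     "Pasta de madera, papel y carton",
--     "Materias textiles y sus manufacturas",
--     "Calzado, sombrereria, paraguas",
--     "Manufacturas de piedra, yeso, vidrio, ceramica",
--     "Perlas finas, piedras y metales preciosos",
--     "Metales comunes y sus manufacturas",
--     "Maquinas y aparatos, material electrico",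
--     "Material de transporte",
--     "Instrumentos de optica, fotografia, medico",
--     "Armas, municiones y sus partes",
--     "Mercancias y productos diversos",
--     "Objetos de arte, antiguedades",
-- ]
--
--
-- def _seccion_para_capitulo(cap: str) -> tuple:
--     """Devuelve (numero_romano, nombre_seccion) para un numero de capitulo str."""
--     try:
--         cap_n = int(cap)
--     except (ValueError, TypeError):
--         return ("?", "Verificar Arancel")
--     if cap_n < 1 or cap_n > 97:
--         return ("?", "Verificar Arancel")
--     lo, hi = 0, len(_ROMANOS) - 1
--     while lo < hi:
--         mid = (lo + hi) // 2
--         if _STARTS[mid + 1] <= cap_n: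
--             lo = mid + 1
--         else:
--             hi = mid
--     return (_ROMANOS[lo], _NOMBRES[lo])
-- ===== Notes on version B (the rewrite author's own statement) =====
-- stated objective: alternative
-- what changed: A scans the 21 (roman, range, name) entries testing range membership each call; B binary-searches a sorted list of section start boundaries after an explicit 1..97 bounds check and indexes parallel roman/name arrays.
import Mathlib
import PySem

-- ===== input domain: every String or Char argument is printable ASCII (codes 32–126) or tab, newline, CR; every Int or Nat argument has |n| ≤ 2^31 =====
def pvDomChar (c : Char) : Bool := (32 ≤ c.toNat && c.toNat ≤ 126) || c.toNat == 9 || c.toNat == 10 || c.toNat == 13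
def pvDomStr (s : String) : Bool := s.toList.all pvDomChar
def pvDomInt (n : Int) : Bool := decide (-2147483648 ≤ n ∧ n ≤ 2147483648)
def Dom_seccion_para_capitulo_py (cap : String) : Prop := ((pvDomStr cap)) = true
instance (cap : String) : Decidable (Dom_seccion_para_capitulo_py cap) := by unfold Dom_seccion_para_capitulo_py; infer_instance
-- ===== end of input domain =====

-- B replaces A's per-call linear scan over 21 chapter ranges by a bounds check plus a
-- binary search over the sorted section start boundaries (alternative algorithm).

-- ===== PORT A =====
-- _SECCIONES_SA: each range(a, b) is kept as its bounds (a, b); 'cap_n in range(a, b)'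
-- for a step-1 range is exactly a ≤ cap_n < b.
def pvSecciones : List (String × Int × Int × String) :=
  [("I",1,6,"Animales vivos y productos del reino animal"),
   ("II",6,15,"Productos del reino vegetal"),
   ("III",15,16,"Grasas y aceites animales o vegetales"),
   ("IV",16,25,"Productos alimenticios; bebidas; tabaco"),
   ("V",25,28,"Productos minerales"),
   ("VI",28,39,"Productos de las industrias quimicas"),
   ("VII",39,41,"Plasticos y caucho"),
   ("VIII",41,44,"Pieles, cueros, peleteria"),
   ("IX",44,47,"Madera, carbon vegetal, corcho"),
   ("X",47,50,"Pasta de madera, papel y carton"),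
   ("XI",50,64,"Materias textiles y sus manufacturas"),
   ("XII",64,68,"Calzado, sombrereria, paraguas"),
   ("XIII",68,71,"Manufacturas de piedra, yeso, vidrio, ceramica"),
   ("XIV",71,72,"Perlas finas, piedras y metales preciosos"),
   ("XV",72,84,"Metales comunes y sus manufacturas"),
   ("XVI",84,86,"Maquinas y aparatos, material electrico"),
   ("XVII",86,90,"Material de transporte"),
   ("XVIII",90,93,"Instrumentos de optica, fotografia, medico"),
   ("XIX",93,94,"Armas, municiones y sus partes"),
   ("XX",94,97,"Mercancias y productos diversos"),
   ("XXI",97,98,"Objetos de arte, antiguedades")]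

-- the 'for romano, rng, nombre in _SECCIONES_SA: if cap_n in rng: return (romano, nombre)'
-- loop with its fall-through default.
def pvLoopA (n : Int) : List (String × Int × Int × String) → String × String
  | [] => ("?", "Verificar Arancel")
  | (romano, lo, hi, nombre) :: rest =>
      if lo ≤ n ∧ n < hi then (romano, nombre) else pvLoopA n rest

def seccion_para_capitulo_py (cap : String) : String × String :=
  match PySem.Int.ofStr? cap with          -- int(cap); none = ValueError
  | none => ("?", "Verificar Arancel")
  | some cap_n => pvLoopA cap_n pvSecciones

-- ===== PORT B =====
def pvStarts : List Int := [1, 6, 15, 16, 25, 28, 39, 41, 44, 47, 50, 64, 68, 71, 72, 84, 86, 90, 93, 94, 97, 98]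
def pvRomanos : List String :=
  ["I", "II", "III", "IV", "V", "VI", "VII", "VIII", "IX", "X", "XI",
   "XII", "XIII", "XIV", "XV", "XVI", "XVII", "XVIII", "XIX", "XX", "XXI"]
def pvNombres : List String :=
  ["Animales vivos y productos del reino animal",
   "Productos del reino vegetal",
   "Grasas y aceites animales o vegetales",
   "Productos alimenticios; bebidas; tabaco",
   "Productos minerales",
   "Productos de las industrias quimicas",
   "Plasticos y caucho",
   "Pieles, cueros, peleteria",
   "Madera, carbon vegetal, corcho",
   "Pasta de madera, papel y carton",
   "Materias textiles y sus manufacturas",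
   "Calzado, sombrereria, paraguas",
   "Manufacturas de piedra, yeso, vidrio, ceramica",
   "Perlas finas, piedras y metales preciosos",
   "Metales comunes y sus manufacturas",
   "Maquinas y aparatos, material electrico",
   "Material de transporte",
   "Instrumentos de optica, fotografia, medico",
   "Armas, municiones y sus partes",
   "Mercancias y productos diversos",
   "Objetos de arte, antiguedades"]

-- Source B's 'while lo < hi' binary search; the fuel argument only makes the loop total
-- (it starts at 21 > hi - lo and is never exhausted), every iteration is the same.
-- _STARTS[mid + 1] is always an in-range non-negative index here, so List.getD is exact.
def pvBSearch (n : Int) : Nat → Nat → Nat → Nat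
  | 0, lo, _ => lo
  | fuel + 1, lo, hi =>
      if lo < hi then
        let mid := (lo + hi) / 2   -- (lo+hi)//2 on non-negative Nats: Lean's Nat '/' = Python '//' here
        if pvStarts.getD (mid + 1) 0 ≤ n then pvBSearch n fuel (mid + 1) hi
        else pvBSearch n fuel lo mid
      else lo

def seccion_para_capitulo_py_alt (cap : String) : String × String :=
  match PySem.Int.ofStr? cap with          -- int(cap); none = ValueError
  | none => ("?", "Verificar Arancel")
  | some cap_n =>
      if cap_n < 1 ∨ cap_n > 97 then ("?", "Verificar Arancel")
      else
        let i := pvBSearch cap_n 21 0 (pvRomanos.length - 1)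
        (pvRomanos.getD i "?", pvNombres.getD i "?")

-- ===== PRECONDITION & SPEC =====
def Spec_seccion_para_capitulo_py (cap : String) (out : String × String) : Prop := out = seccion_para_capitulo_py_alt cap
instance (cap : String) (out : String × String) : Decidable (Spec_seccion_para_capitulo_py cap out) := by unfold Spec_seccion_para_capitulo_py; infer_instance

-- ===== CLAIM =====
def Claim_equal_seccion_para_capitulo_py : Prop := ∀ (cap : String), Dom_seccion_para_capitulo_py cap → Spec_seccion_para_capitulo_py cap (seccion_para_capitulo_py cap)

-- ===== LEMMAS AND PROOFS =====
theorem pvLoopA_none (n : Int) (L : List (String × Int × Int × String))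
    (h : ∀ e ∈ L, ¬(e.2.1 ≤ n ∧ n < e.2.2.1)) :
    pvLoopA n L = ("?", "Verificar Arancel") := by
  induction L with
  | nil => rfl
  | cons e rest ih =>
      obtain ⟨romano, lo, hi, nombre⟩ := e
      rw [pvLoopA, if_neg (h _ List.mem_cons_self)]
      exact ih (fun e he => h e (List.mem_cons_of_mem _ he))

theorem pvSecciones_bounds : ∀ e ∈ pvSecciones, 1 ≤ e.2.1 ∧ e.2.2.1 ≤ 98 := by decide

set_option maxRecDepth 100000 in
set_option maxHeartbeats 1000000 in
theorem pv_inrange (n : Int) (h1 : 1 ≤ n) (h2 : n < 98) :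
    pvLoopA n pvSecciones =
      (pvRomanos.getD (pvBSearch n 21 0 (pvRomanos.length - 1)) "?",
       pvNombres.getD (pvBSearch n 21 0 (pvRomanos.length - 1)) "?") := by
  interval_cases n <;> decide

-- ===== VERDICT =====
theorem seccion_para_capitulo_py_spec : Claim_equal_seccion_para_capitulo_py := by
  intro cap _
  unfold Spec_seccion_para_capitulo_py seccion_para_capitulo_py seccion_para_capitulo_py_alt
  cases PySem.Int.ofStr? cap with
  | none => rfl
  | some n =>
      dsimp only
      by_cases h : n < 1 ∨ n > 97
      · rw [if_pos h]
        exact pvLoopA_none n pvSecciones (fun e he => by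
          have := pvSecciones_bounds e he; omega)
      · rw [if_neg h]
        push Not at h
        exact pv_inrange n h.1 (by omega)
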